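-- pv_equiv track=rewrite | github.com/stephenxie990-blip/invest-evolution | app/investment_body_service.py | _derive_run_status
-- ===== SOURCE A (Python) =====
-- from typing import TYPE_CHECKING, Any, Callable, Optional
--
-- STATUS_OK = "ok"
--
-- STATUS_ERROR = "error"
--
-- STATUS_COMPLETED = "completed"
--
-- STATUS_NO_DATA = "no_data"
--
-- def _derive_run_status(results: list[dict[str, Any]]) -> str:
--     if not results:
--         return "empty"
--     ok_count = sum(1 for item in results if item.get("status") == STATUS_OK)
--     no_data_count = sum(1 for item in results if item.get("status") == STATUS_NO_DATA)
--     error_count = sum(1 for item in results if item.get("status") == STATUS_ERROR)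
--     if error_count and ok_count == 0 and no_data_count == 0:
--         return "failed"
--     if error_count:
--         return "partial_failure"
--     if ok_count == 0 and no_data_count > 0:
--         return "insufficient_data"
--     if no_data_count > 0:
--         return "completed_with_skips"
--     return STATUS_COMPLETED
-- ===== SOURCE B (Python) =====
-- STATUS_OK = "ok"
-- STATUS_ERROR = "error"
-- STATUS_COMPLETED = "completed"
-- STATUS_NO_DATA = "no_data"
--
-- def _derive_run_status(results):
--     if not results:
--         return "empty"
--     has_ok = has_no_data = has_error = False
--     for item in results:
--         s = item.get("status")
--         if s == STATUS_OK:
--             has_ok = True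
--         elif s == STATUS_NO_DATA:
--             has_no_data = True
--         elif s == STATUS_ERROR:
--             has_error = True
--     if has_error:
--         return "partial_failure" if (has_ok or has_no_data) else "failed"
--     if has_no_data:
--         return "completed_with_skips" if has_ok else "insufficient_data"
--     return STATUS_COMPLETED
-- ===== Notes on version B (the rewrite author's own statement) =====
-- stated objective: simpler
-- what changed: Replaces A's three integer-counting scans with a single pass that maintains three boolean presence flags (the decision only ever needs zero/nonzero, never the counts) and a nested two-level decision on the flags.
import Mathlib
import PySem

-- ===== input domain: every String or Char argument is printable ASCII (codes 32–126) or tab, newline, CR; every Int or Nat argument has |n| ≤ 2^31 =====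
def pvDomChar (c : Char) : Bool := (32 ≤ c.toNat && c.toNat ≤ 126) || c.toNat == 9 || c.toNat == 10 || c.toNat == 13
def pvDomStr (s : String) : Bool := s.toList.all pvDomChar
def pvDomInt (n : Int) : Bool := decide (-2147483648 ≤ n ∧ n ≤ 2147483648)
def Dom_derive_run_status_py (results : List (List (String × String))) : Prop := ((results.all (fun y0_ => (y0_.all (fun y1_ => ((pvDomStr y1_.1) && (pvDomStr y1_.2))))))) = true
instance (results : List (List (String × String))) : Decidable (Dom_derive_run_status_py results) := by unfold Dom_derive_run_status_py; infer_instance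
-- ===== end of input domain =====

-- B replaces A's three integer-counting scans with one pass maintaining three boolean
-- presence flags (the decision only needs zero/nonzero) and a nested decision; objective: simpler.


-- ===== PORT A =====
def derive_run_status_py (results : List (List (String × String))) : String :=
  if results = [] then "empty"
  else
    let ok_count := (results.map (fun item => if PySem.Dict.get? (PySem.Dict.mk item) "status" == some "ok" then (1 : Int) else 0)).sum
    let no_data_count := (results.map (fun item => if PySem.Dict.get? (PySem.Dict.mk item) "status" == some "no_data" then (1 : Int) else 0)).sum
    let error_count := (results.map (fun item => if PySem.Dict.get? (PySem.Dict.mk item) "status" == some "error" then (1 : Int) else 0)).sum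
    if error_count ≠ 0 ∧ ok_count = 0 ∧ no_data_count = 0 then "failed"
    else if error_count ≠ 0 then "partial_failure"
    else if ok_count = 0 ∧ no_data_count > 0 then "insufficient_data"
    else if no_data_count > 0 then "completed_with_skips"
    else "completed"

-- ===== PORT B =====
-- one for-loop step: update the (has_ok, has_no_data, has_error) flags from item's status
def pvFlagStep (acc : Bool × Bool × Bool) (item : List (String × String)) : Bool × Bool × Bool :=
  let s := PySem.Dict.get? (PySem.Dict.mk item) "status"
  if s == some "ok" then (true, acc.2.1, acc.2.2)
  else if s == some "no_data" then (acc.1, true, acc.2.2)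
  else if s == some "error" then (acc.1, acc.2.1, true)
  else acc

def derive_run_status_py_alt (results : List (List (String × String))) : String :=
  if results = [] then "empty"
  else
    let flags := results.foldl pvFlagStep (false, false, false)
    if flags.2.2 then
      if flags.1 || flags.2.1 then "partial_failure" else "failed"
    else if flags.2.1 then
      if flags.1 then "completed_with_skips" else "insufficient_data"
    else "completed"

-- ===== PRECONDITION & SPEC =====
def Spec_derive_run_status_py (results : List (List (String × String))) (out : String) : Prop := out = derive_run_status_py_alt results
instance (results : List (List (String × String))) (out : String) : Decidable (Spec_derive_run_status_py results out) := by unfold Spec_derive_run_status_py; infer_instance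

-- ===== CLAIM (what is proved, stated in full; the proofs are below) =====
def Claim_equal_derive_run_status_py : Prop := ∀ (results : List (List (String × String))), Dom_derive_run_status_py results → Spec_derive_run_status_py results (derive_run_status_py results)

-- ===== LEMMAS AND PROOFS =====

-- the flag fold computes, componentwise, "initial flag OR some item has that status"
lemma flag_fold_eq (results : List (List (String × String))) (acc : Bool × Bool × Bool) :
    results.foldl pvFlagStep acc =
      (acc.1 || results.any (fun item => PySem.Dict.get? (PySem.Dict.mk item) "status" == some "ok"),
       acc.2.1 || results.any (fun item => PySem.Dict.get? (PySem.Dict.mk item) "status" == some "no_data"),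
       acc.2.2 || results.any (fun item => PySem.Dict.get? (PySem.Dict.mk item) "status" == some "error")) := by
  induction results generalizing acc with
  | nil => simp
  | cons hd tl ih =>
    simp only [List.foldl_cons, List.any_cons, ih]
    unfold pvFlagStep
    rcases acc with ⟨a, b, c⟩
    by_cases h1 : (PySem.Dict.get? (PySem.Dict.mk hd) "status" == some "ok") = true <;>
      by_cases h2 : (PySem.Dict.get? (PySem.Dict.mk hd) "status" == some "no_data") = true <;>
        by_cases h3 : (PySem.Dict.get? (PySem.Dict.mk hd) "status" == some "error") = true <;>
          simp only [Bool.not_eq_true] at h1 h2 h3 <;>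
          simp [h1, h2, h3, Bool.or_left_comm, Bool.or_assoc] <;>
          simp_all [beq_iff_eq]

-- A's 0/1-sum is a countP; "some item has status s" is "that countP is nonzero"
lemma any_iff_countP {a : Type} (results : List a) (p : a → Bool) :
    (results.any p = true) ↔ List.countP p results ≠ 0 := by
  rw [List.any_eq_true, ← List.countP_pos_iff]; omega

-- ===== VERDICT (by name: the statement is the Claim_ definition above) =====
theorem derive_run_status_py_spec : Claim_equal_derive_run_status_py := by
  intro results _
  unfold Spec_derive_run_status_py derive_run_status_py derive_run_status_py_alt
  by_cases h : results = []
  · simp [h]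
  · simp only [h, if_false, flag_fold_eq, Bool.false_or, PySem.List.sum_map_ite_one_zero]
    split_ifs <;> first
      | rfl
      | (exfalso;
         simp only [any_iff_countP, Bool.or_eq_true, not_or, not_and, not_not, ne_eq] at *;
         omega)
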